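-- pv_equiv track=rewrite | github.com/master-hax/aosp-sepolicy | tests/fc_sort.py | is_meta
-- ===== SOURCE A (Python) =====
-- META_CHARS = frozenset(['.', '^', '$', '?', '*', '+', '|', '[', '(', '{'])
--
-- ESCAPED_META_CHARS = frozenset(['\.', '\^', '\$', '\?', '\*', '\+', '\|', '\[', '\(', '\{'])
--
-- def is_meta(path):
--     """Indicates if a path contains any metacharacter."""
--     meta_char_count = 0
--     escaped_meta_char_count = 0
--     for c in META_CHARS:
--         if c in path:
--             meta_char_count += 1
--     for c in ESCAPED_META_CHARS:
--         if c in path: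
--             escaped_meta_char_count += 1
--     return meta_char_count > escaped_meta_char_count
-- ===== SOURCE B (Python) =====
-- META_CHARS = frozenset(['.', '^', '$', '?', '*', '+', '|', '[', '(', '{'])
--
-- def is_meta(path):
--     """Indicates if a path contains any metacharacter.
--
--     One left-to-right pass with a previous-character state: collect the
--     metacharacters that occur at all, and those that ever occur right after a
--     backslash; the path has an (unescaped-anywhere) metacharacter iff some
--     metacharacter is seen but never seen escaped."""
--     seen = set()
--     escaped = set()
--     prev = None
--     for c in path:
--         if c in META_CHARS:
--             seen.add(c)
--             if prev == '\\':
--                 escaped.add(c)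
--         prev = c
--     return bool(seen - escaped)
-- ===== Notes on version B (the rewrite author's own statement) =====
-- stated objective: alternative
-- what changed: A runs twenty substring searches over the whole path (one per metacharacter and per escaped pattern) and compares the two counts; B makes ONE left-to-right pass with a previous-character state, accumulating the set of metacharacters seen and the set seen immediately after a backslash, and returns whether some metacharacter was seen but never seen escaped (equivalent because an escaped occurrence implies an occurrence, so the count comparison reduces to that existence test).
import Mathlib
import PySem

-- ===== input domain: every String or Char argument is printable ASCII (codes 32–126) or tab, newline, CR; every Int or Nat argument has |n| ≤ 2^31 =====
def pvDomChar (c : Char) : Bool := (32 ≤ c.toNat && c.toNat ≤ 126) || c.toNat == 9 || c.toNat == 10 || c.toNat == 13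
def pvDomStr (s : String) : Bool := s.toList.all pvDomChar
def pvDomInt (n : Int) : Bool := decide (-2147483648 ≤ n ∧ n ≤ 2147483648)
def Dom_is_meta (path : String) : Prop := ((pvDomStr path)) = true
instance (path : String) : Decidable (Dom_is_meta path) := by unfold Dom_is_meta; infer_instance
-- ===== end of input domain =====

-- B replaces A's twenty whole-path substring searches by ONE left-to-right pass with a
-- previous-character state (collecting the metacharacters seen, and those seen right after a
-- backslash), then tests whether some metacharacter was seen but never seen escaped; objective: alternative.

-- the ten regex metacharacters, as 1-character patterns (A iterates a frozenset; only the count is used, so list order is irrelevant)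
def metaChars : List (List Char) := [['.'], ['^'], ['$'], ['?'], ['*'], ['+'], ['|'], ['['], ['('], ['{']]
-- the same metacharacters preceded by a backslash, as 2-character patterns
def escapedMetaChars : List (List Char) :=
  [['\\','.'], ['\\','^'], ['\\','$'], ['\\','?'], ['\\','*'], ['\\','+'], ['\\','|'], ['\\','['], ['\\','('], ['\\','{']]

-- ===== PORT A =====
def is_meta (path : String) : Bool :=
  let meta_char_count :=
    metaChars.foldl (fun acc c => if PySem.Chars.isIn c path.toList then acc + 1 else acc) (0 : Int)
  let escaped_meta_char_count :=
    escapedMetaChars.foldl (fun acc c => if PySem.Chars.isIn c path.toList then acc + 1 else acc) (0 : Int)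
  decide (meta_char_count > escaped_meta_char_count)

-- ===== PORT B =====
-- B's META_CHARS, a set of single characters
def metaSetB : PySem.Set Char := PySem.Set.ofList ['.', '^', '$', '?', '*', '+', '|', '[', '(', '{']

-- B's loop body: state = (prev, seen, escaped)
def altStep (st : Option Char × PySem.Set Char × PySem.Set Char) (c : Char) :
    Option Char × PySem.Set Char × PySem.Set Char :=
  if PySem.Set.contains metaSetB c then
    (some c, PySem.Set.add st.2.1 c,
      if st.1 = some '\\' then PySem.Set.add st.2.2 c else st.2.2)
  else (some c, st.2.1, st.2.2)

def is_meta_alt (path : String) : Bool :=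
  let st := path.toList.foldl altStep (none, PySem.Set.empty, PySem.Set.empty)
  decide (PySem.Set.diff st.2.1 st.2.2 ≠ [])   -- bool(seen - escaped)

-- ===== PRECONDITION & SPEC =====
def Spec_is_meta (path : String) (out : Bool) : Prop := out = is_meta_alt path
instance (path : String) (out : Bool) : Decidable (Spec_is_meta path out) := by unfold Spec_is_meta; infer_instance

-- ===== CLAIM (what is proved, stated in full; the proofs are below) =====
def Claim_equal_is_meta : Prop := ∀ (path : String), Dom_is_meta path → Spec_is_meta path (is_meta path)

-- ===== LEMMAS AND PROOFS =====

-- the 10 metacharacters as a bare list of chars (metaChars/escapedMetaChars are its images)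
def charList : List Char := ['.', '^', '$', '?', '*', '+', '|', '[', '(', '{']

-- countP is strictly larger for the pointwise-weaker predicate iff some element separates them
theorem countP_lt_iff {α : Type} (p q : α → Bool) :
    ∀ (L : List α), (∀ x ∈ L, q x = true → p x = true) →
      (L.countP q < L.countP p ↔ ∃ x ∈ L, p x = true ∧ q x = false) := by
  intro L
  induction L with
  | nil => simp
  | cons a t ih =>
    intro h
    have hle : t.countP q ≤ t.countP p :=
      List.countP_mono_left (fun x hx => h x (List.mem_cons_of_mem a hx))
    have iht := ih (fun x hx => h x (List.mem_cons_of_mem a hx))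
    by_cases hp : p a = true
    · by_cases hq : q a = true
      · have e1 : (a :: t).countP p = t.countP p + 1 := by simp [hp]
        have e2 : (a :: t).countP q = t.countP q + 1 := by simp [hq]
        rw [e1, e2, Nat.add_lt_add_iff_right]
        constructor
        · intro hlt
          obtain ⟨x, hx, h1, h2⟩ := iht.mp hlt
          exact ⟨x, List.mem_cons_of_mem a hx, h1, h2⟩
        · rintro ⟨x, hx, h1, h2⟩
          rcases List.mem_cons.mp hx with rfl | hx'
          · rw [hq] at h2; cases h2
          · exact iht.mpr ⟨x, hx', h1, h2⟩
      · have hq' : q a = false := by simpa using hq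
        have e1 : (a :: t).countP p = t.countP p + 1 := by simp [hp]
        have e2 : (a :: t).countP q = t.countP q := by simp [hq']
        rw [e1, e2]
        constructor
        · intro _; exact ⟨a, List.mem_cons_self, hp, hq'⟩
        · intro _; omega
    · have hp' : p a = false := by simpa using hp
      have hq' : q a = false := by
        by_contra hq''
        exact hp (h a List.mem_cons_self (by simpa using hq''))
      have e1 : (a :: t).countP p = t.countP p := by simp [hp']
      have e2 : (a :: t).countP q = t.countP q := by simp [hq']
      rw [e1, e2, iht]
      constructor
      · rintro ⟨x, hx, h1, h2⟩
        exact ⟨x, List.mem_cons_of_mem a hx, h1, h2⟩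
      · rintro ⟨x, hx, h1, h2⟩
        rcases List.mem_cons.mp hx with rfl | hx'
        · rw [hp'] at h1; cases h1
        · exact ⟨x, hx', h1, h2⟩

-- a 2-character pattern is a substring of p.toList ++ l iff it straddles p and l's head, or lies in l
theorem pair_infix_option (p : Option Char) (a b : Char) (l : List Char) :
    [a, b] <:+: (p.toList ++ l) ↔ (p = some a ∧ l.head? = some b) ∨ [a, b] <:+: l := by
  cases p with
  | none => simp
  | some y =>
    simp only [Option.toList, List.cons_append, List.nil_append, List.infix_cons_iff]
    cases l with
    | nil =>
      constructor
      · rintro (hpre | hinf)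
        · have := hpre.length_le; simp at this
        · have := hinf.sublist.length_le; simp at this
      · rintro (⟨_, h⟩ | hinf)
        · simp at h
        · have := hinf.sublist.length_le; simp at this
    | cons c t =>
      simp [List.cons_prefix_cons, List.infix_cons_iff, eq_comm]

-- invariant for B's 'seen' component
theorem fold_seen_mem (x : Char) :
    ∀ (l : List Char) (prev : Option Char) (seen escaped : PySem.Set Char),
      (x ∈ (l.foldl altStep (prev, seen, escaped)).2.1 ↔ x ∈ seen ∨ (x ∈ metaSetB ∧ x ∈ l)) := by
  intro l
  induction l with
  | nil => simp
  | cons c t ih =>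
    intro prev seen escaped
    by_cases hc : PySem.Set.contains metaSetB c
    · have hcm : c ∈ metaSetB := (PySem.Set.contains_iff _ _).mp hc
      simp only [List.foldl_cons, altStep, hc, if_pos, ih, PySem.Set.mem_add, List.mem_cons]
      constructor
      · rintro ((hs | rfl) | ⟨hm, ht⟩)
        · exact Or.inl hs
        · exact Or.inr ⟨hcm, Or.inl rfl⟩
        · exact Or.inr ⟨hm, Or.inr ht⟩
      · rintro (hs | ⟨hm, rfl | ht⟩)
        · exact Or.inl (Or.inl hs)
        · exact Or.inl (Or.inr rfl)
        · exact Or.inr ⟨hm, ht⟩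
    · have hcm : c ∉ metaSetB := fun hmem => hc ((PySem.Set.contains_iff _ _).mpr hmem)
      simp only [List.foldl_cons, altStep, hc, ih, List.mem_cons]
      constructor
      · rintro (hs | ⟨hm, ht⟩)
        · exact Or.inl hs
        · exact Or.inr ⟨hm, Or.inr ht⟩
      · rintro (hs | ⟨hm, rfl | ht⟩)
        · exact Or.inl hs
        · exact absurd hm hcm
        · exact Or.inr ⟨hm, ht⟩

-- invariant for B's 'escaped' component
theorem fold_escaped_mem (x : Char) :
    ∀ (l : List Char) (prev : Option Char) (seen escaped : PySem.Set Char),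
      (x ∈ (l.foldl altStep (prev, seen, escaped)).2.2 ↔
        x ∈ escaped ∨ (x ∈ metaSetB ∧ ['\\', x] <:+: (prev.toList ++ l))) := by
  intro l
  induction l with
  | nil =>
    intro prev seen escaped
    cases prev with
    | none => simp
    | some y =>
      simp only [List.foldl_nil, Option.toList, List.append_nil]
      constructor
      · exact Or.inl
      · rintro (he | ⟨_, hinf⟩)
        · exact he
        · have := hinf.sublist.length_le; simp at this
  | cons c t ih =>
    intro prev seen escaped
    rw [pair_infix_option, List.head?_cons]
    simp only [Option.some.injEq]
    by_cases hc : PySem.Set.contains metaSetB c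
    · have hcm : c ∈ metaSetB := (PySem.Set.contains_iff _ _).mp hc
      by_cases hp : prev = some '\\'
      · have hstep : altStep (prev, seen, escaped) c
            = (some c, PySem.Set.add seen c, PySem.Set.add escaped c) := by
          simp [altStep, hp, hcm]
        rw [List.foldl_cons, hstep,
          ih (some c) (PySem.Set.add seen c) (PySem.Set.add escaped c), PySem.Set.mem_add]
        simp only [Option.toList_some, List.cons_append, List.nil_append]
        constructor
        · rintro ((he | rfl) | ⟨hm, hinf⟩)
          · exact Or.inl he
          · exact Or.inr ⟨hcm, Or.inl ⟨hp, rfl⟩⟩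
          · exact Or.inr ⟨hm, Or.inr hinf⟩
        · rintro (he | ⟨hm, ⟨_, rfl⟩ | hinf⟩)
          · exact Or.inl (Or.inl he)
          · exact Or.inl (Or.inr rfl)
          · exact Or.inr ⟨hm, hinf⟩
      · have hstep : altStep (prev, seen, escaped) c
            = (some c, PySem.Set.add seen c, escaped) := by
          simp [altStep, hp, hcm]
        rw [List.foldl_cons, hstep, ih (some c) (PySem.Set.add seen c) escaped]
        simp only [Option.toList_some, List.cons_append, List.nil_append]
        constructor
        · rintro (he | ⟨hm, hinf⟩)
          · exact Or.inl he
          · exact Or.inr ⟨hm, Or.inr hinf⟩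
        · rintro (he | ⟨hm, ⟨h1, _⟩ | hinf⟩)
          · exact Or.inl he
          · exact absurd h1 hp
          · exact Or.inr ⟨hm, hinf⟩
    · have hcm : c ∉ metaSetB := fun hmem => hc ((PySem.Set.contains_iff _ _).mpr hmem)
      have hstep : altStep (prev, seen, escaped) c = (some c, seen, escaped) := by
        simp [altStep, hcm]
      rw [List.foldl_cons, hstep, ih (some c) seen escaped]
      simp only [Option.toList_some, List.cons_append, List.nil_append]
      constructor
      · rintro (he | ⟨hm, hinf⟩)
        · exact Or.inl he
        · exact Or.inr ⟨hm, Or.inr hinf⟩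
      · rintro (he | ⟨hm, ⟨_, rfl⟩ | hinf⟩)
        · exact Or.inl he
        · exact absurd hm hcm
        · exact Or.inr ⟨hm, hinf⟩

-- ===== VERDICT (by name: the statement is the Claim_ definition above) =====
theorem is_meta_spec : Claim_equal_is_meta := by
  intro path _
  unfold Spec_is_meta is_meta is_meta_alt
  dsimp only
  rw [PySem.List.foldl_if_add_one, PySem.List.foldl_if_add_one]
  simp only [zero_add]
  rw [show metaChars = charList.map (fun c => [c]) from rfl,
      show escapedMetaChars = charList.map (fun c => ['\\', c]) from rfl,
      List.countP_map, List.countP_map]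
  rw [decide_eq_decide, gt_iff_lt, Nat.cast_lt]
  have hAB : (List.countP ((fun pat => PySem.Chars.isIn pat path.toList) ∘ fun c => ['\\', c]) charList
        < List.countP ((fun pat => PySem.Chars.isIn pat path.toList) ∘ fun c => [c]) charList)
      ↔ ∃ x ∈ charList, x ∈ path.toList ∧ ¬ (['\\', x] <:+: path.toList) := by
    rw [countP_lt_iff]
    · constructor
      · rintro ⟨x, hx, hp, hq⟩
        refine ⟨x, hx, ?_, ?_⟩
        · have := (PySem.Chars.isIn_iff_infix _ _).mp hp
          simpa [List.singleton_infix_iff] using this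
        · intro hinf
          have : PySem.Chars.isIn ['\\', x] path.toList = true :=
            (PySem.Chars.isIn_iff_infix _ _).mpr hinf
          simp only [Function.comp_apply] at hq
          rw [this] at hq; cases hq
      · rintro ⟨x, hx, hm, hni⟩
        refine ⟨x, hx, ?_, ?_⟩
        · exact (PySem.Chars.isIn_iff_infix _ _).mpr (by simpa [List.singleton_infix_iff] using hm)
        · simp only [Function.comp_apply]
          exact (PySem.Chars.isIn_eq_false_iff _ _).mpr hni
    · intro x _ hq
      have hinf : ['\\', x] <:+: path.toList :=
        (PySem.Chars.isIn_iff_infix _ _).mp (by simpa using hq)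
      exact (PySem.Chars.isIn_iff_infix _ _).mpr
        (((List.suffix_cons '\\' [x]).isInfix.trans hinf))
  rw [hAB]
  constructor
  · rintro ⟨x, hx, hm, hni⟩
    intro hnil
    have hxdiff : x ∈ PySem.Set.diff
        ((path.toList.foldl altStep (none, PySem.Set.empty, PySem.Set.empty)).2.1)
        ((path.toList.foldl altStep (none, PySem.Set.empty, PySem.Set.empty)).2.2) := by
      rw [PySem.Set.mem_diff]
      constructor
      · rw [fold_seen_mem]
        exact Or.inr ⟨(PySem.Set.mem_ofList _ _).mpr hx, hm⟩
      · rw [fold_escaped_mem]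
        rintro (h | ⟨_, hinf⟩)
        · simp [PySem.Set.empty] at h
        · exact hni (by simpa using hinf)
    rw [hnil] at hxdiff
    exact absurd hxdiff (List.not_mem_nil)
  · intro hne
    obtain ⟨x, hxdiff⟩ := List.exists_mem_of_ne_nil _ hne
    rw [PySem.Set.mem_diff, fold_seen_mem, fold_escaped_mem] at hxdiff
    obtain ⟨hs, hnesc⟩ := hxdiff
    rcases hs with h | ⟨hm, hmem⟩
    · simp [PySem.Set.empty] at h
    · refine ⟨x, (PySem.Set.mem_ofList _ _).mp hm, hmem, fun hinf => hnesc ?_⟩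
      exact Or.inr ⟨hm, by simpa using hinf⟩
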